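-- pv_equiv track=rewrite | github.com/chaoss/grimoirelab-elk | grimoire_elk/elk.py | anonymize_params
-- ===== SOURCE A (Python) =====
-- SECRET_PARAMETERS = ["--api-token", "--backend-password"]
--
-- def anonymize_params(parameters):
--     """ The following parameters after SECRET_PARAMETERS will be
--     replaced by 'xxxxx' until the parameter starts with '-'.
--
--     :param parameters: list of parameters
--     :return: list of anonymized parameter
--     """
--
--     secret_param = False
--     param_list = list(parameters)
--     for i, param in enumerate(param_list):
--         if secret_param and param.startswith('-'):
--             secret_param = False
--
--         if not secret_param and param in SECRET_PARAMETERS: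
--             secret_param = True
--         elif secret_param:
--             param_list[i] = "xxxxx"
--
--     return tuple(param_list)
-- ===== SOURCE B (Python) =====
-- SECRET_PARAMETERS = ["--api-token", "--backend-password"]
--
--
-- def anonymize_params(parameters):
--     """Mask values following secret parameters until a token starting with '-'."""
--     params = list(parameters)
--     result = []
--     i = 0
--     n = len(params)
--     while i < n:
--         p = params[i]
--         result.append(p)
--         i += 1
--         if p in SECRET_PARAMETERS:
--             while i < n and not params[i].startswith('-'):
--                 result.append("xxxxx")
--                 i += 1
--     return tuple(result)
-- ===== Notes on version B (the rewrite author's own statement) =====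
-- stated objective: alternative
-- what changed: Replaced A's flat single-pass boolean state machine with a two-level loop: an outer scan that copies tokens and, after each secret parameter, an inner scan that masks tokens until one starting with '-'.
import Mathlib
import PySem

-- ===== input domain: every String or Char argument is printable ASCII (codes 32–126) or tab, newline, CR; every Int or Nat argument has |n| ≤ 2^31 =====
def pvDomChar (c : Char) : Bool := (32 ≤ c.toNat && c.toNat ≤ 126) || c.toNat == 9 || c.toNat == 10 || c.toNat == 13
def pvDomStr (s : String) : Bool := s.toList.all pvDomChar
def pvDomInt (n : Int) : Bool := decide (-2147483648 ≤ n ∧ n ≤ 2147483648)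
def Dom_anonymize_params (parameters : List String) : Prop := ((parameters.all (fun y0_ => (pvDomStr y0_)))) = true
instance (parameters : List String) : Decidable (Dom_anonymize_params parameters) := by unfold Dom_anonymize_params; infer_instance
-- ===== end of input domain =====

-- B replaces A's flat boolean state machine by an outer copy loop with an inner masking scan after each secret parameter (alternative decomposition, same cost).


-- ===== PORT A =====
def pvSecretParams : List String := ["--api-token", "--backend-password"]

-- A's for-loop over param_list with the boolean flag `secret_param`, step for step.
def anonLoopA (secret : Bool) : List String → List String
  | [] => []
  | p :: rest =>
    let secret1 := if secret && p.startsWith "-" then false else secret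
    if !secret1 && p ∈ pvSecretParams then
      p :: anonLoopA true rest
    else if secret1 then
      "xxxxx" :: anonLoopA secret1 rest
    else
      p :: anonLoopA secret1 rest

def anonymize_params (parameters : List String) : List String :=
  anonLoopA false parameters

-- ===== PORT B =====
-- inner while loop of B: masked prefix (until a token starting with '-') and the remainder
def pvSplitRegion : List String → List String × List String
  | [] => ([], [])
  | p :: rest =>
    if p.startsWith "-" then ([], p :: rest)
    else
      let (m, r) := pvSplitRegion rest
      ("xxxxx" :: m, r)

theorem pvSplitRegion_len (l : List String) : (pvSplitRegion l).2.length ≤ l.length := by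
  induction l with
  | nil => simp [pvSplitRegion]
  | cons p rest ih =>
    simp only [pvSplitRegion]
    split
    · simp
    · simpa using Nat.le_succ_of_le ih

def anonymize_params_alt (parameters : List String) : List String :=
  match parameters with
  | [] => []
  | p :: rest =>
    if p ∈ pvSecretParams then
      p :: ((pvSplitRegion rest).1 ++ anonymize_params_alt (pvSplitRegion rest).2)
    else
      p :: anonymize_params_alt rest
termination_by parameters.length
decreasing_by
  · exact Nat.lt_succ_of_le (pvSplitRegion_len rest)
  · simp

-- ===== PRECONDITION & SPEC =====
def Spec_anonymize_params (parameters : List String) (out : List String) : Prop := out = anonymize_params_alt parameters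
instance (parameters : List String) (out : List String) : Decidable (Spec_anonymize_params parameters out) := by unfold Spec_anonymize_params; infer_instance

-- ===== CLAIM (what is proved, stated in full; the proofs are below) =====
def Claim_equal_anonymize_params : Prop := ∀ (parameters : List String), Dom_anonymize_params parameters → Spec_anonymize_params parameters (anonymize_params parameters)

-- ===== LEMMAS AND PROOFS =====

theorem anon_both (l : List String) :
    anonLoopA false l = anonymize_params_alt l ∧
    anonLoopA true l = (pvSplitRegion l).1 ++ anonymize_params_alt (pvSplitRegion l).2 := by
  induction l with
  | nil => simp [anonLoopA, anonymize_params_alt, pvSplitRegion]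
  | cons p rest ih =>
    obtain ⟨ihF, ihT⟩ := ih
    constructor
    · by_cases hs : p ∈ pvSecretParams
      · simp [anonLoopA, anonymize_params_alt, hs, ihT]
      · simp [anonLoopA, anonymize_params_alt, hs, ihF]
    · by_cases hd : p.startsWith "-"
      · by_cases hs : p ∈ pvSecretParams
        · simp [anonLoopA, anonymize_params_alt, pvSplitRegion, hd, hs, ihT]
        · simp [anonLoopA, anonymize_params_alt, pvSplitRegion, hd, hs, ihF]
      · simp [anonLoopA, pvSplitRegion, hd, ihT]

-- ===== VERDICT (by name: the statement is the Claim_ definition above) =====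
theorem anonymize_params_spec : Claim_equal_anonymize_params := by
  intro parameters _
  unfold Spec_anonymize_params anonymize_params
  exact (anon_both parameters).1
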